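-- pv_equiv track=rewrite | github.com/NerdToMars/NLP_assignment | src/impact_pipelines.py | _render_typed_spans
-- ===== SOURCE A (Python) =====
-- def _render_typed_spans(num_tokens: int, spans: list[tuple[int, int, str]]) -> list[str]:
--     tags = ["O"] * num_tokens
--     for start, end, label in sorted(spans, key=lambda item: (item[0], item[1])):
--         if start < 0 or end >= num_tokens or start > end:
--             continue
--         if any(tags[position] != "O" for position in range(start, end + 1)):
--             continue
--         tags[start] = f"B-{label}"
--         for position in range(start + 1, end + 1):
--             tags[position] = f"I-{label}"
--     return tags
-- ===== SOURCE B (Python) =====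
-- def _render_typed_spans(num_tokens: int, spans: list[tuple[int, int, str]]) -> list[str]:
--     # Single sorted sweep: keep only the rightmost filled index; a sorted span is
--     # acceptable iff it is in range and starts after it; the output is built append-only.
--     pieces = []
--     last_end = -1
--     for start, end, label in sorted(spans, key=lambda item: (item[0], item[1])):
--         if 0 <= start <= end < num_tokens and start > last_end:
--             pieces.extend(["O"] * (start - last_end - 1))
--             pieces.append("B-" + label)
--             pieces.extend(["I-" + label] * (end - start))
--             last_end = end
--     pieces.extend(["O"] * (num_tokens - last_end - 1))
--     return pieces
-- ===== Notes on version B (the rewrite author's own statement) =====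
-- stated objective: alternative
-- what changed: Replaces A's mutate-a-tag-array loop with per-span overlap rescans by a single sorted sweep that tracks only the last filled index (spans are sorted by start, so overlap with the filled region is exactly 'start <= last_end') and builds the output append-only.
import Mathlib
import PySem

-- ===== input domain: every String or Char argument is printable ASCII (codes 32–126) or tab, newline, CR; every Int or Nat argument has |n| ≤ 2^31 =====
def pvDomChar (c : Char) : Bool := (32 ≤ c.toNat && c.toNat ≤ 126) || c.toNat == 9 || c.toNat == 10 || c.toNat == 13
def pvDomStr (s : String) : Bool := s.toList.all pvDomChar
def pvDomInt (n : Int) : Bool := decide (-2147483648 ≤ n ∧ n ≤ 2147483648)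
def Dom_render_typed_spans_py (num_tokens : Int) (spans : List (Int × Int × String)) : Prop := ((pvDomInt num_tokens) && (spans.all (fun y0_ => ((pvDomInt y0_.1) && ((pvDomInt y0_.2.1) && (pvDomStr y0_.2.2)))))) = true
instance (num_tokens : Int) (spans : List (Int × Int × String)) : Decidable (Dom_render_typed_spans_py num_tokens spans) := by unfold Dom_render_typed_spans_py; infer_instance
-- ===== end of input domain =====

-- B replaces A's per-span rescan of the tag array by a single sorted sweep tracking only
-- the last filled index, building the output append-only (objective: alternative).

-- ===== PORT A =====
-- pyGetD/pySetD are exact here: A's guard ensures every index read or written lies in [0, num_tokens).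
def render_typed_spans_py (num_tokens : Int) (spans : List (Int × Int × String)) : List String :=
  (PySem.List.sorted2 spans (fun it => it.1) (fun it => it.2.1)).foldl
    (fun tags it =>
      if it.1 < 0 ∨ it.2.1 ≥ num_tokens ∨ it.1 > it.2.1 then tags
      else if (PySem.List.pyRange it.1 (it.2.1 + 1) 1).any
                (fun position => PySem.List.pyGetD tags position "" != "O") then tags
      else
        (PySem.List.pyRange (it.1 + 1) (it.2.1 + 1) 1).foldl
          (fun t position => PySem.List.pySetD t position ("I-" ++ it.2.2))
          (PySem.List.pySetD tags it.1 ("B-" ++ it.2.2)))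
    (List.replicate num_tokens.toNat "O")

-- ===== PORT B =====
def render_typed_spans_py_alt (num_tokens : Int) (spans : List (Int × Int × String)) : List String :=
  let st := (PySem.List.sorted2 spans (fun it => it.1) (fun it => it.2.1)).foldl
    (fun acc it =>
      if 0 ≤ it.1 ∧ it.1 ≤ it.2.1 ∧ it.2.1 < num_tokens ∧ acc.2 < it.1 then
        (acc.1 ++ List.replicate (it.1 - acc.2 - 1).toNat "O"
               ++ ["B-" ++ it.2.2]
               ++ List.replicate (it.2.1 - it.1).toNat ("I-" ++ it.2.2), it.2.1)
      else acc)
    ([], -1)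
  st.1 ++ List.replicate (num_tokens - st.2 - 1).toNat "O"

-- ===== PRECONDITION & SPEC =====
def Spec_render_typed_spans_py (num_tokens : Int) (spans : List (Int × Int × String)) (out : List String) : Prop := out = render_typed_spans_py_alt num_tokens spans
instance (num_tokens : Int) (spans : List (Int × Int × String)) (out : List String) : Decidable (Spec_render_typed_spans_py num_tokens spans out) := by unfold Spec_render_typed_spans_py; infer_instance

-- ===== CLAIM (what is proved, stated in full; the proofs are below) =====
def Claim_equal_render_typed_spans_py : Prop := ∀ (num_tokens : Int) (spans : List (Int × Int × String)), Dom_render_typed_spans_py num_tokens spans → Spec_render_typed_spans_py num_tokens spans (render_typed_spans_py num_tokens spans)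

-- ===== LEMMAS AND PROOFS =====

lemma pvTag_ne (pre lab : String) (h2 : pre.length = 2) : (pre ++ lab) ≠ "O" := by
  intro h
  have := congrArg String.length h
  simp only [String.length_append] at this
  have h3 : ("O" : String).length = 1 := rfl
  omega

-- named copies of the two fold bodies (definitionally equal to the lambdas in the ports)
def pvStepA (num_tokens : Int) (tags : List String) (it : Int × Int × String) : List String :=
  if it.1 < 0 ∨ it.2.1 ≥ num_tokens ∨ it.1 > it.2.1 then tags
  else if (PySem.List.pyRange it.1 (it.2.1 + 1) 1).any
            (fun position => PySem.List.pyGetD tags position "" != "O") then tags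
  else
    (PySem.List.pyRange (it.1 + 1) (it.2.1 + 1) 1).foldl
      (fun t position => PySem.List.pySetD t position ("I-" ++ it.2.2))
      (PySem.List.pySetD tags it.1 ("B-" ++ it.2.2))

def pvStepB (num_tokens : Int) (acc : List String × Int) (it : Int × Int × String) : List String × Int :=
  if 0 ≤ it.1 ∧ it.1 ≤ it.2.1 ∧ it.2.1 < num_tokens ∧ acc.2 < it.1 then
    (acc.1 ++ List.replicate (it.1 - acc.2 - 1).toNat "O"
           ++ ["B-" ++ it.2.2]
           ++ List.replicate (it.2.1 - it.1).toNat ("I-" ++ it.2.2), it.2.1)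
  else acc

lemma pvA_eq (n : Int) (spans : List (Int × Int × String)) :
    render_typed_spans_py n spans =
      (PySem.List.sorted2 spans (fun it => it.1) (fun it => it.2.1)).foldl (pvStepA n)
        (List.replicate n.toNat "O") := rfl

lemma pvB_eq (n : Int) (spans : List (Int × Int × String)) :
    render_typed_spans_py_alt n spans =
      (let st := (PySem.List.sorted2 spans (fun it => it.1) (fun it => it.2.1)).foldl (pvStepB n) ([], -1)
       st.1 ++ List.replicate (n - st.2 - 1).toNat "O") := rfl

def pvBefore (a b : Int × Int × String) : Bool :=
  decide (a.1 < b.1) || (!decide (b.1 < a.1) && decide (a.2.1 < b.2.1))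

lemma pvBefore_asym : ∀ a b, pvBefore a b = true → pvBefore b a = false := by
  intro a b h
  unfold pvBefore at *
  simp only [Bool.or_eq_true, Bool.and_eq_true, Bool.not_eq_true', decide_eq_true_eq,
    decide_eq_false_iff_not, Bool.or_eq_false_iff, Bool.and_eq_false_iff,
    Bool.not_eq_false', not_lt] at *
  omega

lemma pvBefore_tr : ∀ a b c, pvBefore b a = false → pvBefore c b = false → pvBefore c a = false := by
  intro a b c h1 h2
  unfold pvBefore at *
  simp only [Bool.or_eq_false_iff, Bool.and_eq_false_iff, Bool.not_eq_false',
    decide_eq_false_iff_not, decide_eq_true_eq, not_lt] at *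
  omega

-- insertion sort produces a list pairwise in S a b := (before b a = false), given asymmetry and a transitivity law
lemma pvInsertBy_pairwise {α : Type} (before : α → α → Bool)
    (asym : ∀ a b, before a b = true → before b a = false)
    (tr : ∀ a b c, before b a = false → before c b = false → before c a = false)
    (x : α) (acc : List α) (h : acc.Pairwise (fun a b => before b a = false)) :
    (PySem.List.insertBy before x acc).Pairwise (fun a b => before b a = false) := by
  induction acc with
  | nil => simp [PySem.List.insertBy]
  | cons y ys ih =>
    rcases List.pairwise_cons.mp h with ⟨hy, hys⟩
    by_cases hb : before x y = true
    · simp only [PySem.List.insertBy, hb, if_pos]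
      refine List.pairwise_cons.mpr ⟨?_, List.pairwise_cons.mpr ⟨hy, hys⟩⟩
      intro z hz
      rcases List.mem_cons.mp hz with rfl | hz
      · exact asym _ _ hb
      · exact tr x y z (asym _ _ hb) (hy z hz)
    · simp only [PySem.List.insertBy, hb, if_neg, Bool.not_eq_true]
      refine List.pairwise_cons.mpr ⟨?_, ih hys⟩
      intro z hz
      rcases (PySem.List.mem_insertBy before x z ys).mp hz with rfl | hz
      · simpa using hb
      · exact hy z hz

lemma pvSorted2_pairwise (spans : List (Int × Int × String)) :
    (PySem.List.sorted2 spans (fun it => it.1) (fun it => it.2.1)).Pairwise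
      (fun a b => a.1 ≤ b.1) := by
  have hfold : ∀ (xs acc : List (Int × Int × String)),
      acc.Pairwise (fun a b => pvBefore b a = false) →
      (xs.foldl (fun acc x => PySem.List.insertBy pvBefore x acc) acc).Pairwise
        (fun a b => pvBefore b a = false) := by
    intro xs
    induction xs with
    | nil => intro acc h; exact h
    | cons x t ih =>
      intro acc h
      exact ih _ (pvInsertBy_pairwise pvBefore pvBefore_asym pvBefore_tr x acc h)
  have heq : PySem.List.sorted2 spans (fun it => it.1) (fun it => it.2.1) =
      spans.foldl (fun acc x => PySem.List.insertBy pvBefore x acc) [] := rfl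
  rw [heq]
  refine (hfold spans [] (by simp)).imp ?_
  intro a b hab
  unfold pvBefore at hab
  simp only [Bool.or_eq_false_iff, decide_eq_false_iff_not, not_lt] at hab
  exact hab.1

-- filling a replicate block by successive sets
lemma pvFill (v x : String) : ∀ (k : Nat) (pre suf : List String),
    (PySem.List.pyRange (pre.length : Int) ((pre.length : Int) + k) 1).foldl
        (fun t p => PySem.List.pySetD t p v) (pre ++ List.replicate k x ++ suf)
      = pre ++ List.replicate k v ++ suf := by
  intro k
  induction k with
  | zero =>
    intro pre suf
    simp
  | succ k ih =>
    intro pre suf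
    rw [PySem.List.pyRange_one_cons (by omega)]
    simp only [List.foldl_cons]
    have hset : PySem.List.pySetD (pre ++ List.replicate (k + 1) x ++ suf) (pre.length : Int) v
        = (pre ++ [v]) ++ List.replicate k x ++ suf := by
      rw [PySem.List.pySetD_natCast, List.append_assoc,
        List.set_append_right pre.length v (le_refl _)]
      simp [List.replicate_succ, List.set_cons_zero]
    rw [hset]
    have harg : (pre.length : Int) + 1 = ((pre ++ [v]).length : Int) := by simp
    have harg2 : (pre.length : Int) + ((k + 1 : Nat) : Int)
        = ((pre ++ [v]).length : Int) + (k : Nat) := by simp; omega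
    rw [harg, harg2, ih (pre ++ [v]) suf]
    simp [List.replicate_succ, List.append_assoc]

-- the main loop invariant
lemma pvLoop (n : Int) : ∀ (L : List (Int × Int × String)) (pieces : List String) (lastEnd : Int),
    L.Pairwise (fun a b => a.1 ≤ b.1) →
    ((pieces.length : Int) = lastEnd + 1) →
    (lastEnd = -1 ∨ ∃ ls : Int, 0 ≤ ls ∧ ls ≤ lastEnd ∧ lastEnd < n ∧
        (∀ it ∈ L, ls ≤ it.1) ∧
        (∀ p : Int, ls ≤ p → p ≤ lastEnd → pieces.getD p.toNat "" ≠ "O")) →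
    L.foldl (pvStepA n) (pieces ++ List.replicate (n - lastEnd - 1).toNat "O")
      = (L.foldl (pvStepB n) (pieces, lastEnd)).1
          ++ List.replicate (n - (L.foldl (pvStepB n) (pieces, lastEnd)).2 - 1).toNat "O" := by
  intro L
  induction L with
  | nil => intro pieces lastEnd _ _ _; rfl
  | cons it rest ih =>
    intro pieces lastEnd hPW hplen hinv
    obtain ⟨s, e, lab⟩ := it
    rcases List.pairwise_cons.mp hPW with ⟨hhd, hPW'⟩
    simp only [List.foldl_cons]
    by_cases hval : 0 ≤ s ∧ s ≤ e ∧ e < n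
    · obtain ⟨hs0, hse, hen⟩ := hval
      by_cases hov : s ≤ lastEnd
      · -- overlapping span: A's any-scan finds a non-"O" tag, B's guard fails
        have hEx : ∃ ls : Int, 0 ≤ ls ∧ ls ≤ lastEnd ∧ lastEnd < n ∧
            (∀ b ∈ ((s, e, lab) :: rest), ls ≤ b.1) ∧
            (∀ p : Int, ls ≤ p → p ≤ lastEnd → pieces.getD p.toNat "" ≠ "O") := by
          rcases hinv with h1 | h2
          · omega
          · exact h2
        obtain ⟨ls, hls0, hlsle, _, hall, hcov⟩ := hEx
        have hlss : ls ≤ s := hall _ (List.mem_cons_self)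
        have hsnat : s.toNat < pieces.length := by omega
        have hpne : pieces.getD s.toNat "" ≠ "O" := hcov s hlss hov
        have hany : (PySem.List.pyRange s (e + 1) 1).any
            (fun position => PySem.List.pyGetD
              (pieces ++ List.replicate (n - lastEnd - 1).toNat "O") position "" != "O") = true := by
          rw [List.any_eq_true]
          refine ⟨s, PySem.List.mem_pyRange_one.mpr ⟨le_refl s, by omega⟩, ?_⟩
          rw [PySem.List.pyGetD_eq_getElem _ _ hs0 (by simp; omega)]
          rw [List.getElem_append_left hsnat]
          rw [List.getD_eq_getElem pieces "" hsnat] at hpne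
          simpa using hpne
        have hA : pvStepA n (pieces ++ List.replicate (n - lastEnd - 1).toNat "O") (s, e, lab)
            = pieces ++ List.replicate (n - lastEnd - 1).toNat "O" := by
          simp only [pvStepA]
          rw [if_neg (by omega), if_pos hany]
        have hB : pvStepB n (pieces, lastEnd) (s, e, lab) = (pieces, lastEnd) := by
          simp only [pvStepB]
          rw [if_neg (by omega)]
        rw [hA, hB]
        exact ih pieces lastEnd hPW' hplen
          (Or.inr ⟨ls, hls0, hlsle, by omega, fun b hb => hall b (List.mem_cons_of_mem _ hb), hcov⟩)
      · -- accepted span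
        rw [not_le] at hov
        have hsnat : s.toNat = pieces.length + (s - lastEnd - 1).toNat := by omega
        have hany : (PySem.List.pyRange s (e + 1) 1).any
            (fun position => PySem.List.pyGetD
              (pieces ++ List.replicate (n - lastEnd - 1).toNat "O") position "" != "O") = false := by
          rw [List.any_eq_false]
          intro p hp
          rcases PySem.List.mem_pyRange_one.mp hp with ⟨hp1, hp2⟩
          rw [PySem.List.pyGetD_eq_getElem _ _ (by omega) (by simp; omega)]
          rw [List.getElem_append_right (by omega)]
          simp [List.getElem_replicate]
        -- the write phase of A rewrites exactly the replicate block that B appends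
        have hsplit : List.replicate (n - lastEnd - 1).toNat ("O" : String)
            = List.replicate (s - lastEnd - 1).toNat "O"
              ++ ("O" :: (List.replicate (e - s).toNat "O" ++ List.replicate (n - e - 1).toNat "O")) := by
          have h1 : (n - lastEnd - 1).toNat
              = (s - lastEnd - 1).toNat + (1 + ((e - s).toNat + (n - e - 1).toNat)) := by omega
          rw [h1, List.replicate_add, List.replicate_add, List.replicate_add]
          simp
        have hset : PySem.List.pySetD (pieces ++ List.replicate (n - lastEnd - 1).toNat "O") s ("B-" ++ lab)
            = (pieces ++ List.replicate (s - lastEnd - 1).toNat "O")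
              ++ (("B-" ++ lab) :: (List.replicate (e - s).toNat "O" ++ List.replicate (n - e - 1).toNat "O")) := by
          rw [hsplit, PySem.List.pySetD_of_nonneg _ _ hs0, ← List.append_assoc]
          rw [List.set_append_right _ _ (by simp; omega)]
          congr 1
          have h0 : s.toNat - (pieces ++ List.replicate (s - lastEnd - 1).toNat "O").length = 0 := by
            simp; omega
          rw [h0]
          rfl
        have hpre : ((pieces ++ List.replicate (s - lastEnd - 1).toNat "O" ++ ["B-" ++ lab]).length : Int)
            = s + 1 := by simp; omega
        have hfill := pvFill ("I-" ++ lab) "O" (e - s).toNat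
          (pieces ++ List.replicate (s - lastEnd - 1).toNat "O" ++ ["B-" ++ lab])
          (List.replicate (n - e - 1).toNat "O")
        rw [hpre] at hfill
        have hrange : s + 1 + ((e - s).toNat : Int) = e + 1 := by omega
        rw [hrange] at hfill
        have hA : pvStepA n (pieces ++ List.replicate (n - lastEnd - 1).toNat "O") (s, e, lab)
            = (pieces ++ List.replicate (s - lastEnd - 1).toNat "O" ++ ["B-" ++ lab]
                ++ List.replicate (e - s).toNat ("I-" ++ lab))
              ++ List.replicate (n - e - 1).toNat "O" := by
          simp only [pvStepA]
          rw [if_neg (by omega), if_neg (by rw [hany]; exact Bool.false_ne_true)]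
          rw [hset]
          have harg : (pieces ++ List.replicate (s - lastEnd - 1).toNat "O")
              ++ (("B-" ++ lab) :: (List.replicate (e - s).toNat "O" ++ List.replicate (n - e - 1).toNat "O"))
              = (pieces ++ List.replicate (s - lastEnd - 1).toNat "O" ++ ["B-" ++ lab])
                ++ List.replicate (e - s).toNat "O" ++ List.replicate (n - e - 1).toNat "O" := by
            simp [List.append_assoc]
          rw [harg, hfill]
        have hB : pvStepB n (pieces, lastEnd) (s, e, lab)
            = (pieces ++ List.replicate (s - lastEnd - 1).toNat "O" ++ ["B-" ++ lab]
                ++ List.replicate (e - s).toNat ("I-" ++ lab), e) := by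
          simp only [pvStepB]
          rw [if_pos ⟨hs0, hse, hen, hov⟩]
        rw [hA, hB]
        refine ih _ e hPW' (by simp; omega) (Or.inr ⟨s, hs0, hse, hen, hhd, ?_⟩)
        intro p hp1 hp2
        have hjlo : pieces.length + (s - lastEnd - 1).toNat ≤ p.toNat := by omega
        have hjhi : p.toNat < (pieces ++ List.replicate (s - lastEnd - 1).toNat "O" ++ ["B-" ++ lab]
            ++ List.replicate (e - s).toNat ("I-" ++ lab)).length := by simp; omega
        have hsplit2 : pieces ++ List.replicate (s - lastEnd - 1).toNat "O" ++ ["B-" ++ lab]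
            ++ List.replicate (e - s).toNat ("I-" ++ lab)
            = (pieces ++ List.replicate (s - lastEnd - 1).toNat "O")
              ++ (("B-" ++ lab) :: List.replicate (e - s).toNat ("I-" ++ lab)) := by
          simp [List.append_assoc]
        rw [hsplit2, List.getD_eq_getElem?_getD, List.getElem?_append_right (by simp; omega)]
        by_cases hz : p.toNat - (pieces ++ List.replicate (s - lastEnd - 1).toNat "O").length = 0
        · rw [hz]
          simpa using pvTag_ne "B-" lab rfl
        · obtain ⟨j, hj⟩ : ∃ j, p.toNat - (pieces ++ List.replicate (s - lastEnd - 1).toNat "O").length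
              = j + 1 := ⟨p.toNat - (pieces ++ List.replicate (s - lastEnd - 1).toNat "O").length - 1,
                by omega⟩
          rw [hj, List.getElem?_cons_succ, List.getElem?_replicate]
          have hjk : j < (e - s).toNat := by simp at hj; omega
          rw [if_pos hjk]
          simpa using pvTag_ne "I-" lab rfl
    · -- span rejected by the range guard in both programs
      have hA : pvStepA n (pieces ++ List.replicate (n - lastEnd - 1).toNat "O") (s, e, lab)
          = pieces ++ List.replicate (n - lastEnd - 1).toNat "O" := by
        simp only [pvStepA]
        rw [if_pos (by omega)]
      have hB : pvStepB n (pieces, lastEnd) (s, e, lab) = (pieces, lastEnd) := by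
        simp only [pvStepB]
        rw [if_neg (by omega)]
      rw [hA, hB]
      refine ih pieces lastEnd hPW' hplen ?_
      rcases hinv with h1 | ⟨ls, h2, h3, h4, h5, h6⟩
      · exact Or.inl h1
      · exact Or.inr ⟨ls, h2, h3, h4, fun b hb => h5 b (List.mem_cons_of_mem _ hb), h6⟩

-- ===== VERDICT (by name: the statement is the Claim_ definition above) =====
theorem render_typed_spans_py_spec : Claim_equal_render_typed_spans_py := by
  intro n spans _
  unfold Spec_render_typed_spans_py
  rw [pvA_eq, pvB_eq]
  have h := pvLoop n (PySem.List.sorted2 spans (fun it => it.1) (fun it => it.2.1)) [] (-1)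
    (pvSorted2_pairwise spans) (by simp) (Or.inl rfl)
  simpa using h
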